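-- pv_equiv track=rewrite | github.com/anananyang/learnlp | learnlp/accuracy/accurate.py | __to_region
-- ===== SOURCE A (Python) =====
-- def __to_region(words):
--     region = []
--     start  = 0
--     for word in words:
--         end = start + len(word)
--         region.append((start, end))
--         start =+ end
--     return region
-- ===== SOURCE B (Python) =====
-- def __to_region(words):
--     # Build the boundary table first, then pair adjacent boundaries.
--     bounds = [0]
--     for word in words:
--         bounds.append(bounds[-1] + len(word))
--     return list(zip(bounds, bounds[1:]))
-- ===== Notes on version B (the rewrite author's own statement) =====
-- stated objective: idiomatic
-- what changed: B builds the list of cumulative boundaries once and pairs adjacent boundaries with zip, instead of carrying a running start and appending (start, end) pairs inside the loop.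
import Mathlib
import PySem

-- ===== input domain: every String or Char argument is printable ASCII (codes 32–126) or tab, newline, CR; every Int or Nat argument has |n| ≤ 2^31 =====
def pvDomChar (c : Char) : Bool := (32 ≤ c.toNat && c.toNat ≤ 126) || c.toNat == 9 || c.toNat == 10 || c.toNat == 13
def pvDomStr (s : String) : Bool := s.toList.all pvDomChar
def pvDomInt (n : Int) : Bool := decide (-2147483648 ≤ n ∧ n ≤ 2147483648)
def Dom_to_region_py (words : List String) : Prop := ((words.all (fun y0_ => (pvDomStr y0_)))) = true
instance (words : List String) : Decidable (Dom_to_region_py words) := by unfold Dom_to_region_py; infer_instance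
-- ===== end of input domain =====

-- B (idiomatic, same cost): builds the cumulative boundary list once and zips adjacent boundaries, instead of carrying a running start and appending pairs in the loop.


-- ===== PORT A =====
def to_region_py (words : List String) : List (Int × Int) :=
  (words.foldl (fun st word =>
      let end_ := st.2 + PySem.Str.len word
      (st.1 ++ [(st.2, end_)], end_))
    (([] : List (Int × Int)), (0 : Int))).1

-- ===== PORT B =====
def to_region_py_alt (words : List String) : List (Int × Int) :=
  let bounds := words.foldl (fun bs word => bs ++ [bs.getLast! + PySem.Str.len word]) [(0 : Int)]
  bounds.zip (bounds.drop 1)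

-- ===== PRECONDITION & SPEC =====
def Spec_to_region_py (words : List String) (out : List (Int × Int)) : Prop := out = to_region_py_alt words
instance (words : List String) (out : List (Int × Int)) : Decidable (Spec_to_region_py words out) := by unfold Spec_to_region_py; infer_instance

-- ===== CLAIM (what is proved, stated in full; the proofs are below) =====
def Claim_equal_to_region_py : Prop := ∀ (words : List String), Dom_to_region_py words → Spec_to_region_py words (to_region_py words)

-- ===== LEMMAS AND PROOFS =====

-- ===== VERDICT (by name: the statement is the Claim_ definition above) =====
-- reference recursion: contiguous spans starting at s
def pvSpans (s : Int) : List String → List (Int × Int)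
  | [] => []
  | w :: ws => (s, s + PySem.Str.len w) :: pvSpans (s + PySem.Str.len w) ws

-- reference boundary list starting at s
def pvBounds (s : Int) : List String → List Int
  | [] => [s]
  | w :: ws => s :: pvBounds (s + PySem.Str.len w) ws

theorem pvBounds_head (s : Int) (ws : List String) :
    ∃ t, pvBounds s ws = s :: t := by
  cases ws <;> exact ⟨_, rfl⟩

theorem foldA_eq (ws : List String) : ∀ (r : List (Int × Int)) (s : Int),
    (ws.foldl (fun st word =>
        let end_ := st.2 + PySem.Str.len word
        (st.1 ++ [(st.2, end_)], end_)) (r, s)).1 = r ++ pvSpans s ws := by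
  induction ws with
  | nil => intro r s; simp [pvSpans]
  | cons w ws ih =>
      intro r s
      simp only [List.foldl_cons, pvSpans, ih]
      simp

theorem foldB_eq (ws : List String) : ∀ (pre : List Int) (s : Int),
    ws.foldl (fun bs word => bs ++ [bs.getLast! + PySem.Str.len word]) (pre ++ [s])
      = pre ++ pvBounds s ws := by
  induction ws with
  | nil => intro pre s; simp [pvBounds]
  | cons w ws ih =>
      intro pre s
      simp only [List.foldl_cons]
      have hlast : (pre ++ [s]).getLast! = s := by simp
      rw [hlast]
      have h2 := ih (pre ++ [s]) (s + PySem.Str.len w)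
      simp only [List.append_assoc] at h2 ⊢
      rw [h2]
      simp [pvBounds]

theorem zip_bounds (ws : List String) : ∀ (s : Int),
    (pvBounds s ws).zip ((pvBounds s ws).drop 1) = pvSpans s ws := by
  induction ws with
  | nil => intro s; simp [pvBounds, pvSpans]
  | cons w ws ih =>
      intro s
      obtain ⟨t, ht⟩ := pvBounds_head (s + PySem.Str.len w) ws
      show ((s :: pvBounds (s + PySem.Str.len w) ws).zip
              ((s :: pvBounds (s + PySem.Str.len w) ws).drop 1)) = pvSpans s (w :: ws)
      rw [ht]
      have h3 : ((s + PySem.Str.len w) :: t).zip t = pvSpans (s + PySem.Str.len w) ws := by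
        have h := ih (s + PySem.Str.len w)
        rw [ht] at h
        simpa using h
      simp only [List.drop_succ_cons, List.drop_zero, List.zip_cons_cons, h3]
      rfl

-- ===== VERDICT (by name: the statement is the Claim_ definition above) =====
theorem to_region_py_spec : Claim_equal_to_region_py := by
  intro words _
  unfold Spec_to_region_py to_region_py to_region_py_alt
  rw [foldA_eq]
  have hb := foldB_eq words [] 0
  simp only [List.nil_append] at hb
  rw [hb, zip_bounds]
  simp
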